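-- pv_equiv track=rewrite | github.com/dagdaAle/video_transcribe | process_video.py | split_into_phrases
-- ===== SOURCE A (Python) =====
-- def split_into_phrases(text, min_words=15, max_words=30):
--     words = text.split()
--     phrases = []
--     current_phrase = []
--
--     for word in words:
--         current_phrase.append(word)
--         if len(current_phrase) >= min_words and (len(current_phrase) >= max_words or word.endswith(('.', '!', '?'))):
--             phrases.append(' '.join(current_phrase))
--             current_phrase = []
--
--     if current_phrase:
--         if len(current_phrase) < min_words and phrases:
--             phrases[-1] += ' ' + ' '.join(current_phrase)
--         else:
--             phrases.append(' '.join(current_phrase))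
--
--     return phrases
-- ===== SOURCE B (Python) =====
-- def _advance(punct, j, i0):
--     # first position j' >= j with punct[j'] >= i0 (punct is increasing)
--     while j < len(punct) and punct[j] < i0:
--         j += 1
--     return j
--
--
-- def split_into_phrases(text, min_words=15, max_words=30):
--     # Boundary-jumping: precompute the indices of punctuation-ending words once,
--     # then compute each phrase break directly by arithmetic + a monotone pointer
--     # into that index list, instead of testing a counter at every word.
--     words = text.split()
--     n = len(words)
--     punct = [i for i, w in enumerate(words) if w.endswith(('.', '!', '?'))]
--     phrases = []
--     start = 0
--     j = 0
--     while True: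
--         i0 = start + max(min_words - 1, 0)          # first index where count >= min_words
--         cap = max(i0, start + max_words - 1)        # index where count >= max_words forces a break
--         j = _advance(punct, j, i0)                  # first punctuation index >= i0
--         brk = punct[j] if j < len(punct) and punct[j] <= cap else cap
--         if brk >= n:
--             break
--         phrases.append(' '.join(words[start:brk + 1]))
--         start = brk + 1
--     if start < n:
--         tail = ' '.join(words[start:])
--         if n - start < min_words and phrases:
--             phrases[-1] += ' ' + tail
--         else:
--             phrases.append(tail)
--     return phrases
-- ===== Notes on version B (the rewrite author's own statement) =====
-- stated objective: alternative
-- what changed: B replaces A's per-word counter scan by boundary jumping: it precomputes the list of indices of punctuation-ending words once, then computes each phrase break directly by arithmetic (first index with count>=min_words, the max_words cap) plus a monotone pointer into the punctuation-index list, and joins the slice between consecutive breaks; no counter is tested word by word.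
import Mathlib
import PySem

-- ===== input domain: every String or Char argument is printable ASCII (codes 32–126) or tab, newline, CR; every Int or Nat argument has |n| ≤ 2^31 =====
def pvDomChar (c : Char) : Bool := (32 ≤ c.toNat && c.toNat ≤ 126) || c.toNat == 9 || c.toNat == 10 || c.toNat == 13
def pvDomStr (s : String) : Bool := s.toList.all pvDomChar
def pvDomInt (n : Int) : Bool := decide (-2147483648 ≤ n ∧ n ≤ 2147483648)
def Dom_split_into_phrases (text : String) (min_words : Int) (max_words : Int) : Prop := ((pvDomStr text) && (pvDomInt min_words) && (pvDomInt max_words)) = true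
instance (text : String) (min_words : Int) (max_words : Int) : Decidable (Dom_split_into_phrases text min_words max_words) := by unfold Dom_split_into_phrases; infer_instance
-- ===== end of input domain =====

-- B replaces A's per-word counter scan by boundary jumping over a precomputed list of
-- punctuation-word indices (each break found by arithmetic + a monotone pointer); alternative algorithm, same cost.

-- shared small helpers (' '.join, word.endswith(('.','!','?')), phrases[-1] += t)
def pvJoin (ws : List String) : String := PySem.Str.join " " ws

def pvEndsPunct (w : String) : Bool :=
  PySem.Str.endswith w "." || PySem.Str.endswith w "!" || PySem.Str.endswith w "?"

def pvAppendLast : List String → String → List String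
  | [], _ => []
  | [x], t => [x ++ t]
  | x :: y :: rest, t => x :: pvAppendLast (y :: rest) t

-- ===== PORT A =====
def pvLoopA (mn mx : Int) : List String → List String × List String → List String × List String
  | [], st => st
  | w :: ws, (phrases, cur) =>
    let cur' := cur ++ [w]
    if mn ≤ (cur'.length : Int) ∧ ((mx ≤ (cur'.length : Int)) ∨ pvEndsPunct w = true) then
      pvLoopA mn mx ws (phrases ++ [pvJoin cur'], [])
    else
      pvLoopA mn mx ws (phrases, cur')

def split_into_phrases (text : String) (min_words : Int) (max_words : Int) : List String :=
  let words := PySem.Str.split₀ text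
  let st := pvLoopA min_words max_words words ([], [])
  let phrases := st.1
  let cur := st.2
  if cur = [] then phrases
  else if (cur.length : Int) < min_words ∧ phrases ≠ [] then
    pvAppendLast phrases (" " ++ pvJoin cur)
  else phrases ++ [pvJoin cur]

-- ===== PORT B =====
-- punct = [i for i, w in enumerate(words) if w.endswith(('.', '!', '?'))]
def pvPunctIdx (words : List String) : List Int :=
  ((PySem.List.enumerate words 0).filter (fun p => pvEndsPunct p.2)).map Prod.fst

-- _advance(punct, j, i0): while j < len(punct) and punct[j] < i0: j += 1
-- (the while loop walks the suffix punct[j:] structurally, carrying the index j)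
def pvAdvanceGo (rest : List Int) (i0 : Int) (j : Nat) : Nat :=
  match rest with
  | [] => j
  | p :: rs => if p < i0 then pvAdvanceGo rs i0 (j + 1) else j

def pvAdvance (punct : List Int) (j : Nat) (i0 : Int) : Nat :=
  pvAdvanceGo (punct.drop j) i0 j

-- brk = punct[j] if j < len(punct) and punct[j] <= cap else cap
def pvBrk (punct : List Int) (j : Nat) (cap : Int) : Int :=
  match punct[j]? with
  | some p => if p ≤ cap then p else cap
  | none => cap

-- the while True loop of Source B, carrying (start, j, phrases); the fuel argument only
-- makes the recursion structural (the wrapper passes enough fuel: start grows every turn)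
def pvLoopB (words : List String) (punct : List Int) (mn mx : Int) :
    Nat → Nat → Nat → List String → List String × Nat
  | 0, start, _j, phrases => (phrases, start)
  | fuel + 1, start, j, phrases =>
    let i0 : Int := ↑start + max (mn - 1) 0
    let cap : Int := max i0 (↑start + mx - 1)
    let j' := pvAdvance punct j i0
    let brk : Int := pvBrk punct j' cap
    if brk < (words.length : Int) then
      pvLoopB words punct mn mx fuel (brk.toNat + 1) j'
        (phrases ++ [pvJoin (PySem.List.slice words (some ↑start) (some (brk + 1)))])
    else (phrases, start)

def split_into_phrases_alt (text : String) (min_words : Int) (max_words : Int) : List String :=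
  let words := PySem.Str.split₀ text
  let n := words.length
  let punct := pvPunctIdx words
  let st := pvLoopB words punct min_words max_words (words.length + 1) 0 0 []
  let phrases := st.1
  let start := st.2
  if start < n then
    let tail := pvJoin (PySem.List.slice words (some ↑start) none)
    if ((n : Int) - (start : Int)) < min_words ∧ phrases ≠ [] then
      pvAppendLast phrases (" " ++ tail)
    else phrases ++ [tail]
  else phrases

-- ===== PRECONDITION & SPEC =====
def Spec_split_into_phrases (text : String) (min_words : Int) (max_words : Int) (out : List String) : Prop := out = split_into_phrases_alt text min_words max_words
instance (text : String) (min_words : Int) (max_words : Int) (out : List String) : Decidable (Spec_split_into_phrases text min_words max_words out) := by unfold Spec_split_into_phrases; infer_instance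

-- ===== CLAIM (what is proved, stated in full; the proofs are below) =====
def Claim_equal_split_into_phrases : Prop := ∀ (text : String) (min_words : Int) (max_words : Int), Dom_split_into_phrases text min_words max_words → Spec_split_into_phrases text min_words max_words (split_into_phrases text min_words max_words)

-- ===== LEMMAS AND PROOFS =====

-- A's break condition at absolute index k (phrase started at index start), word w = L[k]
def pvCond (mn mx : Int) (start k : Nat) (w : String) : Prop :=
  mn ≤ (↑(k - start) : Int) + 1 ∧ ((mx ≤ (↑(k - start) : Int) + 1) ∨ pvEndsPunct w = true)

-- pointer invariant: entries before j are below start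
def pvInv (punct : List Int) (j start : Nat) : Prop :=
  ∀ idx q, punct[idx]? = some q → idx < j → q < ↑start

theorem pvBrk_some (punct : List Int) (j : Nat) (cap p : Int) (h : punct[j]? = some p) :
    pvBrk punct j cap = if p ≤ cap then p else cap := by simp [pvBrk, h]

theorem pvBrk_none (punct : List Int) (j : Nat) (cap : Int) (h : punct[j]? = none) :
    pvBrk punct j cap = cap := by simp [pvBrk, h]

theorem pvBrk_ge (punct : List Int) (j : Nat) (i0 cap : Int)
    (hc : i0 ≤ cap) (hadv : ∀ p, punct[j]? = some p → i0 ≤ p) : i0 ≤ pvBrk punct j cap := by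
  cases h : punct[j]? with
  | some p => have := hadv p h; rw [pvBrk_some punct j cap p h]; split <;> omega
  | none => rw [pvBrk_none punct j cap h]; exact hc

lemma pvPunct_pairwise (L : List String) : (pvPunctIdx L).Pairwise (· < ·) := by
  unfold pvPunctIdx
  rw [List.pairwise_map]
  exact (PySem.List.pairwise_lt_enumerate L 0).filter _

lemma pvPunct_mem (L : List String) (x : Int) :
    x ∈ pvPunctIdx L ↔ ∃ (k : Nat) (h : k < L.length), x = ↑k ∧ pvEndsPunct L[k] = true := by
  unfold pvPunctIdx
  simp only [List.mem_map, List.mem_filter, PySem.List.mem_enumerate_iff]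
  constructor
  · rintro ⟨⟨i, w⟩, ⟨⟨k, hk, hp⟩, he⟩, rfl⟩
    cases hp
    exact ⟨k, hk, by simpa using he⟩
  · rintro ⟨k, hk, rfl, he⟩
    exact ⟨(↑k, L[k]), ⟨⟨k, hk, by simp⟩, he⟩, rfl⟩

lemma pvAdvanceGo_spec (punct : List Int) (i0 : Int) :
    ∀ (rest : List Int) (j : Nat), punct.drop j = rest →
      j ≤ pvAdvanceGo rest i0 j ∧
      (∀ p, punct[pvAdvanceGo rest i0 j]? = some p → i0 ≤ p) ∧
      (∀ idx q, j ≤ idx → idx < pvAdvanceGo rest i0 j → punct[idx]? = some q → q < i0) := by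
  intro rest
  induction rest with
  | nil =>
    intro j hd
    refine ⟨le_refl _, ?_, ?_⟩
    · intro p hp
      obtain ⟨hlt, -⟩ := List.getElem?_eq_some_iff.mp hp
      have := List.drop_eq_nil_iff.mp hd
      simp only [pvAdvanceGo] at hlt
      omega
    · intro idx q h1 h2 _
      simp only [pvAdvanceGo] at h2
      omega
  | cons p rs ihr =>
    intro j hd
    have hj : punct[j]? = some p := by
      have h0 : (punct.drop j)[0]? = some p := by rw [hd]; rfl
      rw [List.getElem?_drop] at h0; simpa using h0
    have hrs : punct.drop (j + 1) = rs := by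
      have : (punct.drop j).tail = rs := by rw [hd]; rfl
      rw [← this, List.tail_drop]
    simp only [pvAdvanceGo]
    by_cases hc : p < i0
    · rw [if_pos hc]
      obtain ⟨h1, h2, h3⟩ := ihr (j + 1) hrs
      refine ⟨by omega, h2, ?_⟩
      intro idx q hji hilt hq
      rcases Nat.eq_or_lt_of_le hji with rfl | hj'
      · rw [hj] at hq; cases hq; exact hc
      · exact h3 idx q hj' hilt hq
    · rw [if_neg hc]
      refine ⟨le_refl _, ?_, by omega⟩
      intro q hq
      rw [hj] at hq; cases hq; omega

theorem pvAdvance_le_get (punct : List Int) (j : Nat) (i0 : Int) :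
    ∀ p, punct[pvAdvance punct j i0]? = some p → i0 ≤ p :=
  (pvAdvanceGo_spec punct i0 (punct.drop j) j rfl).2.1

lemma pvAdvance_spec (punct : List Int) (j : Nat) (i0 : Int) :
    j ≤ pvAdvance punct j i0 ∧
    ∀ idx q, j ≤ idx → idx < pvAdvance punct j i0 → punct[idx]? = some q → q < i0 :=
  ⟨(pvAdvanceGo_spec punct i0 (punct.drop j) j rfl).1,
   (pvAdvanceGo_spec punct i0 (punct.drop j) j rfl).2.2⟩

-- all punct entries at index < j' (advanced pointer) are < i0; entries at index ≥ j' are ≥ brk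
lemma pvBelow (punct : List Int) (j start : Nat) (i0 : Int) (hinv : pvInv punct j start)
    (hs : (↑start : Int) ≤ i0) :
    ∀ idx q, punct[idx]? = some q → idx < pvAdvance punct j i0 → q < i0 := by
  intro idx q hq hlt
  by_cases hj : idx < j
  · exact lt_of_lt_of_le (hinv idx q hq hj) hs
  · exact (pvAdvance_spec punct j i0).2 idx q (by omega) hlt hq

lemma pvAbove (punct : List Int) (hpw : punct.Pairwise (· < ·)) (j' : Nat) (cap : Int) :
    ∀ idx q, punct[idx]? = some q → j' ≤ idx → pvBrk punct j' cap ≤ q := by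
  intro idx q hq hge
  obtain ⟨hidx, hgq⟩ := List.getElem?_eq_some_iff.mp hq
  cases h : punct[j']? with
  | some p =>
    have hpq : p ≤ q := by
      obtain ⟨hj', hpj⟩ := List.getElem?_eq_some_iff.mp h
      rcases Nat.eq_or_lt_of_le hge with rfl | hlt
      · rw [hpj] at hgq; omega
      · have := List.pairwise_iff_getElem.mp hpw j' idx hj' hidx hlt
        rw [hpj, hgq] at this; omega
    rw [pvBrk_some punct j' cap p h]
    split <;> omega
  | none =>
    obtain hlen := List.getElem?_eq_none_iff.mp h
    omega

lemma pvBrk_le_cap (punct : List Int) (j : Nat) (cap : Int) : pvBrk punct j cap ≤ cap := by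
  unfold pvBrk
  cases h : punct[j]? with
  | some p => split <;> omega
  | none => exact le_refl _

-- characterisation of A's condition via i0/cap
lemma pvCond_iff (mn mx : Int) (start k : Nat) (w : String) (hk : start ≤ k) :
    pvCond mn mx start k w ↔
    ((↑start + max (mn - 1) 0 : Int) ≤ ↑k ∧
      ((max (↑start + max (mn - 1) 0) (↑start + mx - 1) : Int) ≤ ↑k ∨ pvEndsPunct w = true)) := by
  unfold pvCond
  have hc : (↑(k - start) : Int) = ↑k - ↑start := by omega
  rw [hc]
  constructor
  · rintro ⟨h1, h2 | h2⟩
    · exact ⟨by omega, Or.inl (by omega)⟩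
    · exact ⟨by omega, Or.inr h2⟩
  · rintro ⟨h1, h2 | h2⟩
    · exact ⟨by omega, Or.inl (by omega)⟩
    · exact ⟨by omega, Or.inr h2⟩

-- no index in [start, brk) satisfies the condition
lemma pvMin (L : List String) (mn mx : Int) (start j : Nat) (hinv : pvInv (pvPunctIdx L) j start) :
    ∀ k : Nat, start ≤ k → (hk : k < L.length) →
      (↑k : Int) < pvBrk (pvPunctIdx L) (pvAdvance (pvPunctIdx L) j (↑start + max (mn - 1) 0))
        (max (↑start + max (mn - 1) 0) (↑start + mx - 1)) →
      ¬ pvCond mn mx start k L[k] := by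
  intro k hks hk hbrk hcond
  set i0 : Int := ↑start + max (mn - 1) 0 with hi0
  set cap : Int := max i0 (↑start + mx - 1) with hcap
  set j' := pvAdvance (pvPunctIdx L) j i0 with hj'
  rw [pvCond_iff mn mx start k _ hks] at hcond
  obtain ⟨h1, h2 | h2⟩ := hcond
  · have := pvBrk_le_cap (pvPunctIdx L) j' cap
    omega
  · have hmem : (↑k : Int) ∈ pvPunctIdx L := (pvPunct_mem L _).mpr ⟨k, hk, rfl, h2⟩
    obtain ⟨idx, hidx, hget⟩ := List.getElem_of_mem hmem
    have hq : (pvPunctIdx L)[idx]? = some ↑k := by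
      rw [List.getElem?_eq_some_iff]; exact ⟨hidx, hget⟩
    by_cases hlt : idx < j'
    · have := pvBelow (pvPunctIdx L) j start i0 hinv (by omega) idx _ hq hlt
      omega
    · have := pvAbove (pvPunctIdx L) (pvPunct_pairwise L) j' cap idx _ hq (by omega)
      omega

-- if brk < n, then brk is a break index
lemma pvHit (L : List String) (mn mx : Int) (start j : Nat) :
    pvBrk (pvPunctIdx L) (pvAdvance (pvPunctIdx L) j (↑start + max (mn - 1) 0))
        (max (↑start + max (mn - 1) 0) (↑start + mx - 1)) < (L.length : Int) →
    ∃ (t : Nat) (ht : t < L.length),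
      (↑t : Int) = pvBrk (pvPunctIdx L) (pvAdvance (pvPunctIdx L) j (↑start + max (mn - 1) 0))
        (max (↑start + max (mn - 1) 0) (↑start + mx - 1)) ∧
      start ≤ t ∧ pvCond mn mx start t L[t] := by
  intro hlt
  set i0 : Int := ↑start + max (mn - 1) 0 with hi0
  set cap : Int := max i0 (↑start + mx - 1) with hcap
  set j' := pvAdvance (pvPunctIdx L) j i0 with hj'
  have hge : i0 ≤ pvBrk (pvPunctIdx L) j' cap :=
    pvBrk_ge _ _ _ _ (le_max_left _ _) (pvAdvance_le_get _ _ _)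
  have hs0 : (↑start : Int) ≤ i0 := by omega
  cases h : (pvPunctIdx L)[j']? with
  | some p =>
    by_cases hpc : p ≤ cap
    · have hB : pvBrk (pvPunctIdx L) j' cap = p := by
        rw [pvBrk_some _ _ _ _ h, if_pos hpc]
      rw [hB] at hlt hge ⊢
      have hp : p ∈ pvPunctIdx L := by
        obtain ⟨hj, hg⟩ := List.getElem?_eq_some_iff.mp h
        exact hg ▸ List.getElem_mem hj
      obtain ⟨kp, hkp, rfl, hpe⟩ := (pvPunct_mem L p).mp hp
      refine ⟨kp, hkp, rfl, by omega, ?_⟩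
      rw [pvCond_iff mn mx start kp _ (by omega)]
      exact ⟨by omega, Or.inr hpe⟩
    · have hB : pvBrk (pvPunctIdx L) j' cap = cap := by
        rw [pvBrk_some _ _ _ _ h, if_neg hpc]
      rw [hB] at hlt hge ⊢
      refine ⟨cap.toNat, by omega, by omega, by omega, ?_⟩
      rw [pvCond_iff mn mx start cap.toNat _ (by omega)]
      exact ⟨by omega, Or.inl (by omega)⟩
  | none =>
    have hB : pvBrk (pvPunctIdx L) j' cap = cap := pvBrk_none _ _ _ h
    rw [hB] at hlt hge ⊢
    refine ⟨cap.toNat, by omega, by omega, by omega, ?_⟩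
    rw [pvCond_iff mn mx start cap.toNat _ (by omega)]
    exact ⟨by omega, Or.inl (by omega)⟩

-- one extension step of A's cur buffer  (needs start ≤ i < L.length)
lemma pvCur_step (L : List String) (start i : Nat) (hs : start ≤ i) (hi : i < L.length) :
    (L.drop start).take (i - start) ++ [L[i]] = (L.drop start).take (i + 1 - start) := by
  have h1 : i + 1 - start = (i - start) + 1 := by omega
  rw [h1, List.take_add_one]
  have hix : (L.drop start)[i - start]? = some L[i] := by
    rw [List.getElem?_drop]
    have hsum : start + (i - start) = i := by omega
    rw [hsum, List.getElem?_eq_getElem hi]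
  simp [hix]

lemma pvCur_len (L : List String) (start i : Nat) (_hs : start ≤ i) (hi : i ≤ L.length) :
    (((L.drop start).take (i - start)).length : Int) = ↑(i - start) := by
  simp
  omega

-- A's scan from i up to the first break t: it reaches the break and emits the phrase
lemma pvScanA_hit (L : List String) (mn mx : Int) (start t : Nat) (ph : List String)
    (hts : start ≤ t) (htn : t < L.length)
    (hcond : pvCond mn mx start t L[t])
    (hmin : ∀ k : Nat, start ≤ k → k < t → ∀ (hk : k < L.length), ¬ pvCond mn mx start k L[k]) :
    ∀ i, start ≤ i → i ≤ t →
      pvLoopA mn mx (L.drop i) (ph, (L.drop start).take (i - start)) =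
      pvLoopA mn mx (L.drop (t + 1)) (ph ++ [pvJoin ((L.drop start).take (t + 1 - start))], []) := by
  intro i
  induction ht : t - i generalizing i with
  | zero =>
    intro hsi hit
    have : i = t := by omega
    subst this
    rw [List.drop_eq_getElem_cons htn]
    simp only [pvLoopA]
    rw [if_pos]
    · rw [pvCur_step L start i hsi htn]
    · rw [pvCur_step L start i hsi htn, pvCur_len L start (i+1) (by omega) (by omega)]
      obtain ⟨h1, h2⟩ := hcond
      have hc : (↑(i + 1 - start) : Int) = ↑(i - start) + 1 := by omega
      rw [hc]
      exact ⟨h1, h2⟩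
  | succ m ihm =>
    intro hsi hit
    have hiln : i < L.length := by omega
    rw [List.drop_eq_getElem_cons hiln]
    simp only [pvLoopA]
    rw [if_neg]
    · rw [pvCur_step L start i hsi hiln]
      exact ihm (i + 1) (by omega) (by omega) (by omega)
    · intro hc
      refine hmin i hsi (by omega) hiln ?_
      rw [pvCur_step L start i hsi hiln, pvCur_len L start (i+1) (by omega) (by omega)] at hc
      have hcc : (↑(i + 1 - start) : Int) = ↑(i - start) + 1 := by omega
      rw [hcc] at hc
      exact hc

-- A's scan with no break until the end: final state keeps the whole tail as cur
lemma pvScanA_none (L : List String) (mn mx : Int) (start : Nat) (ph : List String)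
    (hmin : ∀ k : Nat, start ≤ k → ∀ (hk : k < L.length), ¬ pvCond mn mx start k L[k]) :
    ∀ i, start ≤ i → i ≤ L.length →
      pvLoopA mn mx (L.drop i) (ph, (L.drop start).take (i - start)) = (ph, L.drop start) := by
  intro i
  induction hd : L.length - i generalizing i with
  | zero =>
    intro hsi hil
    have : i = L.length := by omega
    subst this
    simp only [List.drop_length, pvLoopA]
    congr 1
    apply List.take_of_length_le
    simp
  | succ m ihm =>
    intro hsi hil
    have hiln : i < L.length := by omega
    rw [List.drop_eq_getElem_cons hiln]
    simp only [pvLoopA]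
    rw [if_neg]
    · rw [pvCur_step L start i hsi hiln]
      exact ihm (i + 1) (by omega) (by omega) (by omega)
    · intro hc
      refine hmin i hsi hiln ?_
      rw [pvCur_step L start i hsi hiln, pvCur_len L start (i+1) (by omega) (by omega)] at hc
      have hcc : (↑(i + 1 - start) : Int) = ↑(i - start) + 1 := by omega
      rw [hcc] at hc
      exact hc

-- main correspondence: A's scan from a boundary equals B's boundary-jumping loop
lemma pvMain (L : List String) (mn mx : Int) :
    ∀ (fuel start j : Nat) (ph : List String), L.length - start < fuel →
      start ≤ L.length → pvInv (pvPunctIdx L) j start →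
      pvLoopA mn mx (L.drop start) (ph, []) =
        ((pvLoopB L (pvPunctIdx L) mn mx fuel start j ph).1,
         L.drop (pvLoopB L (pvPunctIdx L) mn mx fuel start j ph).2) ∧
      (pvLoopB L (pvPunctIdx L) mn mx fuel start j ph).2 ≤ L.length := by
  intro fuel
  induction fuel with
  | zero => intro start j ph hf; omega
  | succ f ihf =>
  intro start j ph hf hsl hinv
  set i0 : Int := ↑start + max (mn - 1) 0 with hi0
  set cap : Int := max i0 (↑start + mx - 1) with hcap
  set j' := pvAdvance (pvPunctIdx L) j i0 with hj'
  set brk := pvBrk (pvPunctIdx L) j' cap with hbrkdef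
  have hge : i0 ≤ brk := pvBrk_ge _ _ _ _ (le_max_left _ _) (pvAdvance_le_get _ _ _)
  have hs0 : (↑start : Int) ≤ i0 := by omega
  rw [pvLoopB]
  simp only [← hi0, ← hcap, ← hj', ← hbrkdef]
  have hEE : pvBrk (pvPunctIdx L) (pvAdvance (pvPunctIdx L) j (↑start + max (mn - 1) 0))
      (max (↑start + max (mn - 1) 0) (↑start + mx - 1)) = brk := by
    rw [hbrkdef, hj', hcap, hi0]
  by_cases hb : brk < (L.length : Int)
  · rw [if_pos hb]
    obtain ⟨t, htn, htb, hts, hcond⟩ := pvHit L mn mx start j (by rw [hEE]; exact hb)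
    rw [hEE] at htb
    have hphrase : PySem.List.slice L (some ↑start) (some (brk + 1)) =
        (L.drop start).take (t + 1 - start) := by
      have : brk + 1 = ((t + 1 : Nat) : Int) := by omega
      rw [this, PySem.List.slice_natCast]
    have hstep := pvScanA_hit L mn mx start t ph hts htn hcond
      (fun k hk1 hk2 hk3 => pvMin L mn mx start j hinv k hk1 hk3 (by rw [hEE]; omega))
      start (le_refl _) hts
    simp only [Nat.sub_self, List.take_zero] at hstep
    have hinv' : pvInv (pvPunctIdx L) j' (brk.toNat + 1) := by
      intro idx q hq hlt
      have := pvBelow (pvPunctIdx L) j start i0 hinv hs0 idx q hq hlt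
      omega
    have htoNat : brk.toNat + 1 = t + 1 := by omega
    have := ihf (brk.toNat + 1) j'
      (ph ++ [pvJoin ((L.drop start).take (t + 1 - start))]) (by omega) (by omega) hinv'
    rw [hphrase, hstep, htoNat]
    rw [htoNat] at this
    exact this
  · rw [if_neg hb]
    refine ⟨?_, hsl⟩
    have := pvScanA_none L mn mx start ph
      (fun k hk1 hk3 => pvMin L mn mx start j hinv k hk1 hk3 (by rw [hEE]; omega))
      start (le_refl _) hsl
    simpa using this

-- ===== VERDICT (by name: the statement is the Claim_ definition above) =====
theorem split_into_phrases_spec : Claim_equal_split_into_phrases := by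
  intro text mn mx _
  unfold Spec_split_into_phrases split_into_phrases split_into_phrases_alt
  dsimp only
  set L := PySem.Str.split₀ text with hL
  obtain ⟨hmain, hle⟩ := pvMain L mn mx (L.length + 1) 0 0 [] (by omega) (Nat.zero_le _)
    (by intro idx q hq h; omega)
  simp only [List.drop_zero] at hmain
  set st := (pvLoopB L (pvPunctIdx L) mn mx (L.length + 1) 0 0 []).2 with hst
  rw [hmain]
  have htail : PySem.List.slice L (some (↑st : Int)) none = L.drop st :=
    PySem.List.slice_from_natCast L st
  rw [htail]
  have hlen : ((L.drop st).length : Int) = ↑L.length - ↑st := by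
    simp only [List.length_drop]; omega
  rw [hlen]
  by_cases h : st < L.length
  · rw [if_neg (show ¬ L.drop st = [] by rw [List.drop_eq_nil_iff]; omega), if_pos h]
  · rw [if_pos (show L.drop st = [] by rw [List.drop_eq_nil_iff]; omega), if_neg h]
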